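-- pv_equiv track=rewrite | github.com/qaisjp/adventofcode | 2019/day04/app.py | are_two_same
-- ===== SOURCE A (Python) =====
-- from collections import defaultdict
--
-- day = 2
--
-- def are_two_same(n):
--     s = str(n)
--     m = defaultdict(int)
--     for c in s:
--         m[c] += 1
--
--     for char, count in m.items():
--         if (day == 1) and count > 1:
--             return True
--         elif (day == 2) and count == 2:
--             return True
--     return False
-- ===== SOURCE B (Python) =====
-- def are_two_same(n):
--     # Sort the digits of str(n); equal characters become maximal consecutive runs,
--     # so a run of length exactly 2 means some character occurs exactly twice.
--     s = sorted(str(n))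
--     i = 0
--     while i < len(s):
--         j = i
--         while j < len(s) and s[j] == s[i]:
--             j += 1
--         if j - i == 2:
--             return True
--         i = j
--     return False
-- ===== Notes on version B (the rewrite author's own statement) =====
-- stated objective: idiomatic
-- what changed: B replaces A's defaultdict frequency tally plus a scan over dict items by sorting str(n) and scanning maximal runs of equal characters, returning True on a run of length exactly 2.
import Mathlib
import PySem

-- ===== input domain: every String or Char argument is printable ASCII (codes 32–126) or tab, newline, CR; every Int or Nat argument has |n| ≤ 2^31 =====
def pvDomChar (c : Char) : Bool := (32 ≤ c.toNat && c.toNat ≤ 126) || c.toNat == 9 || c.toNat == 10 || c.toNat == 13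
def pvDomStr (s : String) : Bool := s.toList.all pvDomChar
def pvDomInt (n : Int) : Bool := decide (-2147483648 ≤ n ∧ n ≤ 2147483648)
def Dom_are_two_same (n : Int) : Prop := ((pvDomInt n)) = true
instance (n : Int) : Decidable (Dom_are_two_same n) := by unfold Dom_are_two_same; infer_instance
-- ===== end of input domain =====

-- B sorts str(n) and scans maximal runs of equal characters instead of A's defaultdict tally + items scan; proved equal on all Int.


-- ===== PORT A =====
-- module-level constant 'day'
def pvDay : Int := 2

-- the 'for char, count in m.items(): …' loop with its early returns
def pvLoopA : List (Char × Int) → Bool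
  | [] => false
  | (_, count) :: rest =>
    if pvDay == 1 && decide (count > 1) then true
    else if pvDay == 2 && count == 2 then true
    else pvLoopA rest

def are_two_same (n : Int) : Bool :=
  let s := PySem.Int.toChars n
  let m := s.foldl (fun d c => d.modify c 0 (· + 1)) PySem.Dict.empty
  pvLoopA m.items

-- ===== PORT B =====
-- the outer while loop of B: consume one maximal run per step
def pvRunScan : List Char → Bool
  | [] => false
  | c :: rest =>
    if 1 + (rest.takeWhile (· == c)).length == 2 then true
    else pvRunScan (rest.dropWhile (· == c))
termination_by t => t.length
decreasing_by
  simpa using Nat.lt_succ_of_le (List.length_dropWhile_le (· == c) rest)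

def are_two_same_alt (n : Int) : Bool :=
  pvRunScan (PySem.List.sorted (PySem.Int.toChars n) (fun c => c) false)

-- ===== PRECONDITION & SPEC =====
def Spec_are_two_same (n : Int) (out : Bool) : Prop := out = are_two_same_alt n
instance (n : Int) (out : Bool) : Decidable (Spec_are_two_same n out) := by unfold Spec_are_two_same; infer_instance

-- ===== CLAIM (what is proved, stated in full; the proofs are below) =====
def Claim_equal_are_two_same : Prop := ∀ (n : Int), Dom_are_two_same n → Spec_are_two_same n (are_two_same n)

-- ===== LEMMAS AND PROOFS =====

-- A's items loop, with day = 2, is an 'any count == 2' over the items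
theorem pvLoopA_eq (l : List (Char × Int)) :
    pvLoopA l = l.any (fun p => p.2 == 2) := by
  induction l with
  | nil => rfl
  | cons p rest ih =>
    obtain ⟨c, cnt⟩ := p
    simp [pvLoopA, pvDay, ih]
    by_cases h : cnt = 2 <;> simp [h]

-- A returns exactly 'some character of str(n) occurs exactly twice'
theorem pvA_char (n : Int) :
    are_two_same n = true ↔
      ∃ c ∈ PySem.Int.toChars n, (PySem.Int.toChars n).count c = 2 := by
  show pvLoopA (PySem.Dict.counter (PySem.Int.toChars n)).items = true ↔ _
  rw [pvLoopA_eq, PySem.Dict.items_counter]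
  simp only [List.any_map, List.any_eq_true, Function.comp]
  constructor
  · rintro ⟨c, hc, h2⟩
    refine ⟨c, (PySem.Set.mem_ofList _ _).mp hc, ?_⟩
    have h3 : ((PySem.Int.toChars n).count c : Int) = 2 := by simpa using h2
    exact_mod_cast h3
  · rintro ⟨c, hc, h2⟩
    exact ⟨c, (PySem.Set.mem_ofList _ _).mpr hc, by simp [h2]⟩

-- run scan over a (≤)-sorted list finds a character of total count 2
theorem pvRunScan_iff_aux : ∀ (N : Nat) (t : List Char), t.length ≤ N →
    t.Pairwise (· ≤ ·) → (pvRunScan t = true ↔ ∃ c ∈ t, t.count c = 2) := by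
  intro N
  induction N with
  | zero =>
    intro t hlen _
    have : t = [] := List.eq_nil_of_length_eq_zero (Nat.le_zero.mp hlen)
    subst this; simp [pvRunScan]
  | succ N ih =>
    intro t hlen hs
    cases t with
    | nil => simp [pvRunScan]
    | cons c rest =>
      have hsplit : rest.takeWhile (· == c) ++ rest.dropWhile (· == c) = rest :=
        List.takeWhile_append_dropWhile
      have htw : ∀ x ∈ rest.takeWhile (· == c), x = c := by
        intro x hx
        simpa using List.mem_takeWhile_imp hx
      have hrest : ∀ y ∈ rest, c ≤ y := by
        intro y hy; exact (List.pairwise_cons.mp hs).1 y hy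
      have hdw_sub : (rest.dropWhile (· == c)).Sublist rest := List.dropWhile_sublist _
      have hdw_pw : (rest.dropWhile (· == c)).Pairwise (· ≤ ·) :=
        ((List.pairwise_cons.mp hs).2).sublist hdw_sub
      have hlt : ∀ x ∈ rest.dropWhile (· == c), c < x := by
        intro x hx
        have hle : c ≤ x := hrest x (hdw_sub.mem hx)
        rcases lt_or_eq_of_le hle with h | h
        · exact h
        · exfalso
          cases hdw : rest.dropWhile (· == c) with
          | nil => simp [hdw] at hx
          | cons e tail =>
            have he : ¬ (e == c) = true := by
              have := List.head?_dropWhile_not (· == c) rest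
              rw [hdw] at this; simpa using this
            have hec : e ≠ c := by simpa using he
            rw [hdw] at hx hdw_pw
            rcases List.mem_cons.mp hx with rfl | hx'
            · exact hec h.symm
            · have hce : c ≤ e := hrest e (hdw_sub.mem (by rw [hdw]; exact List.mem_cons_self))
              have hex : e ≤ x := (List.pairwise_cons.mp hdw_pw).1 x hx'
              exact hec (le_antisymm (h ▸ hex) hce)
      have hcnotin : c ∉ rest.dropWhile (· == c) := fun h => lt_irrefl c (hlt c h)
      have hrc : rest.count c
          = (rest.takeWhile (· == c)).count c + (rest.dropWhile (· == c)).count c := by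
        conv_lhs => rw [← hsplit]
        exact List.count_append ..
      have hcount_c : (c :: rest).count c = 1 + (rest.takeWhile (· == c)).length := by
        rw [List.count_cons_self, hrc]
        have h1 : (rest.takeWhile (· == c)).count c = (rest.takeWhile (· == c)).length :=
          List.count_eq_length.mpr (by intro x hx; simp [htw x hx])
        have h2 : (rest.dropWhile (· == c)).count c = 0 :=
          List.count_eq_zero.mpr hcnotin
        omega
      have hcount_other : ∀ x ∈ rest.dropWhile (· == c),
          (c :: rest).count x = (rest.dropWhile (· == c)).count x := by
        intro x hx
        have hxc : x ≠ c := fun h => lt_irrefl c (h ▸ hlt x hx)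
        have hrx : rest.count x
            = (rest.takeWhile (· == c)).count x + (rest.dropWhile (· == c)).count x := by
          conv_lhs => rw [← hsplit]
          exact List.count_append ..
        rw [List.count_cons_of_ne hxc.symm, hrx]
        have : (rest.takeWhile (· == c)).count x = 0 :=
          List.count_eq_zero.mpr (fun h => hxc (htw x h))
        omega
      have hdwlen : (rest.dropWhile (· == c)).length ≤ N := by
        have h1 := List.length_dropWhile_le (· == c) rest
        simp at hlen; omega
      rw [pvRunScan]
      split_ifs with hrun
      · have hrun' : 1 + (rest.takeWhile (· == c)).length = 2 := by simpa using hrun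
        simp only [true_iff]
        exact ⟨c, List.mem_cons_self, by omega⟩
      · have hrun' : 1 + (rest.takeWhile (· == c)).length ≠ 2 := by simpa using hrun
        rw [ih _ hdwlen hdw_pw]
        constructor
        · rintro ⟨x, hx, hcx⟩
          exact ⟨x, List.mem_cons_of_mem _ (hdw_sub.mem hx), (hcount_other x hx) ▸ hcx⟩
        · rintro ⟨x, hx, hcx⟩
          by_cases hxc : x = c
          · subst hxc; exact absurd (hcount_c ▸ hcx) hrun'
          · have hx' : x ∈ rest := by
              rcases List.mem_cons.mp hx with h | h
              · exact absurd h hxc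
              · exact h
            have hxdw : x ∈ rest.dropWhile (· == c) := by
              rw [← hsplit] at hx'
              rcases List.mem_append.mp hx' with h | h
              · exact absurd (htw x h) hxc
              · exact h
            exact ⟨x, hxdw, ((hcount_other x hxdw).symm ▸ hcx)⟩

theorem pvRunScan_iff (t : List Char) (hs : t.Pairwise (· ≤ ·)) :
    pvRunScan t = true ↔ ∃ c ∈ t, t.count c = 2 :=
  pvRunScan_iff_aux t.length t le_rfl hs

-- ===== VERDICT (by name: the statement is the Claim_ definition above) =====
theorem are_two_same_spec : Claim_equal_are_two_same := by
  intro n _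
  unfold Spec_are_two_same are_two_same_alt
  set s := PySem.Int.toChars n with hsdef
  have hperm : (PySem.List.sorted s (fun c => c) false).Perm s :=
    PySem.List.sorted_perm s _ false
  have hpw : (PySem.List.sorted s (fun c => c) false).Pairwise (· ≤ ·) := by
    simpa using PySem.List.sorted_pairwise s (fun c => c)
  have hB := pvRunScan_iff _ hpw
  have hA := pvA_char n
  rw [← hsdef] at hA
  have : are_two_same n = true ↔
      pvRunScan (PySem.List.sorted s (fun c => c) false) = true := by
    rw [hA, hB]
    constructor
    · rintro ⟨c, hc, h2⟩
      exact ⟨c, hperm.mem_iff.mpr hc, by rw [hperm.count_eq]; exact h2⟩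
    · rintro ⟨c, hc, h2⟩
      exact ⟨c, hperm.mem_iff.mp hc, by rw [← hperm.count_eq]; exact h2⟩
  cases hA2 : are_two_same n <;> cases hB2 : pvRunScan (PySem.List.sorted s (fun c => c) false)
  · rfl
  · rw [hA2, hB2] at this; simp at this
  · rw [hA2, hB2] at this; simp at this
  · rfl
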